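-- pv_equiv track=rewrite | github.com/mingmingsoo/mingmingsoo | 백준/Gold/1941. 소문난 칠공주/소문난 칠공주.py | bfs
-- ===== SOURCE A (Python) =====
-- from collections import deque
--
-- row = [-1,1,0,0]
--
-- col = [0,0,1,-1]
--
-- def bfs(grid, r, c):
--     # 정점이 연결된게 7개면 true
--     edge = 0
--     visited = [[False]*5 for i in range(5)]
--     visited[r][c] = True
--     q = deque([(r,c)])
--
--     while q:
--         r, c = q.popleft()
--
--         for k in range(4):
--             nr = r+row[k]
--             nc = c+col[k]
--             if(not(0<=nr<5 and 0<=nc<5)):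
--                 continue
--             if(not visited[nr][nc] and grid[nr][nc] == 1):
--                 visited[nr][nc] = True
--                 q.append((nr,nc))
--                 edge+=1
--     if(edge>=6):
--         return True
--     else:
--         return False
-- ===== SOURCE B (Python) =====
-- def dfs(grid, visited, r, c):
--     # component size via recursive depth-first flood fill
--     size = 1
--     for dr, dc in ((-1, 0), (1, 0), (0, 1), (0, -1)):
--         nr, nc = r + dr, c + dc
--         if 0 <= nr < 5 and 0 <= nc < 5 and not visited[nr][nc] and grid[nr][nc] == 1:
--             visited[nr][nc] = True
--             size += dfs(grid, visited, nr, nc)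
--     return size
--
--
-- def bfs(grid, r, c):
--     visited = [[False] * 5 for _ in range(5)]
--     visited[r][c] = True
--     return dfs(grid, visited, r, c) >= 7
-- ===== Notes on version B (the rewrite author's own statement) =====
-- stated objective: alternative
-- what changed: Replaces the iterative queue-driven BFS with explicit edge counting by a recursive depth-first flood fill: a dfs helper marks each in-range unvisited 1-neighbour and returns 1 plus the recursive component sizes, and bfs compares that size with 7.
import Mathlib
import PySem

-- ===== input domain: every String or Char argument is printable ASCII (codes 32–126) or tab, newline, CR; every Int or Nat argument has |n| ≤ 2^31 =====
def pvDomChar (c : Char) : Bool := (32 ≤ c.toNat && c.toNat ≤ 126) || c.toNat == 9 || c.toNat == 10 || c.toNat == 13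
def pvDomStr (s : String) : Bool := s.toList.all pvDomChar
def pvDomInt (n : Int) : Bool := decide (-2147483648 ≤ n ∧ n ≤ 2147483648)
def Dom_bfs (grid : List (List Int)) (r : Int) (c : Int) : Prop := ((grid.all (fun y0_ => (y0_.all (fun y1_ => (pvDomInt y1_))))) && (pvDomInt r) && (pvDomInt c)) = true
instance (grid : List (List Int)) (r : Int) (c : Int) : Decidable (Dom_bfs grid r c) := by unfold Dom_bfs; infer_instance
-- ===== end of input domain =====

-- B replaces the iterative queue-driven BFS with explicit edge counting by a
-- recursive depth-first flood fill that returns the component size and compares it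
-- with 7; objective: alternative (same cost on the fixed 5x5 board).

-- ===== PORT A =====
-- row = [-1,1,0,0] ; col = [0,0,1,-1]
def rowOff : List Int := [-1, 1, 0, 0]
def colOff : List Int := [0, 0, 1, -1]

-- grid[i][j] == 1 (both indices guarded in range 0..4 by A before the access)
def gridIs1 (grid : List (List Int)) (i j : Int) : Bool :=
  ((PySem.List.pyGet? grid i).bind (fun rw => PySem.List.pyGet? rw j)) == some 1

-- Python list subscript for the length-5 visited rows: a negative index counts
-- from the end (exact for -5 <= i < 5, the only indices A reaches without raising)
def wrapIdx (i : Int) : Int := if i < 0 then i + 5 else i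

-- visited[i][j] (read)
def vGet (v : List (List Bool)) (i j : Int) : Bool :=
  (v.getD (wrapIdx i).toNat []).getD (wrapIdx j).toNat false

-- visited[i][j] = True
def vSet (v : List (List Bool)) (i j : Int) : List (List Bool) :=
  v.set (wrapIdx i).toNat ((v.getD (wrapIdx i).toNat []).set (wrapIdx j).toNat true)

-- body of `for k in range(4)` : state is (visited, appended queue part, edge)
def neighStep (grid : List (List Int)) (r c : Int)
    (st : List (List Bool) × List (Int × Int) × Int) (k : Int) :
    List (List Bool) × List (Int × Int) × Int :=
  let nr := r + PySem.List.pyGetD rowOff k 0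
  let nc := c + PySem.List.pyGetD colOff k 0
  if ¬(0 ≤ nr ∧ nr < 5 ∧ 0 ≤ nc ∧ nc < 5) then st
  else if ¬ vGet st.1 nr nc ∧ gridIs1 grid nr nc then
    (vSet st.1 nr nc, st.2.1 ++ [(nr, nc)], st.2.2 + 1)
  else st

-- `while q:` — fuel-guarded (the guard only makes the same computation total:
-- on every admitted input the loop runs at most 26 iterations, see loop lemmas)
def bfsLoop (grid : List (List Int)) :
    Nat → List (Int × Int) → List (List Bool) → Int → Int
  | 0, _, _, e => e
  | _ + 1, [], _, e => e
  | fuel + 1, (r, c) :: q, v, e =>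
    let st := (PySem.List.pyRange 0 4 1).foldl (neighStep grid r c) (v, [], e)
    bfsLoop grid fuel (q ++ st.2.1) st.1 st.2.2

def bfs (grid : List (List Int)) (r : Int) (c : Int) : Bool :=
  let v0 := vSet (List.replicate 5 (List.replicate 5 false)) r c
  decide (6 ≤ bfsLoop grid 1000 [(r, c)] v0 0)

-- ===== PORT B =====
-- the neighbour offsets ((-1, 0), (1, 0), (0, 1), (0, -1))
def offs : List (Int × Int) := [(-1, 0), (1, 0), (0, 1), (0, -1)]

-- body of dfs's `for dr, dc in ...` loop: possibly mark one neighbour and recurse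
def dfsVisit (grid : List (List Int))
    (go : List (List Bool) → Int → Int → List (List Bool) × Int) (r c : Int)
    (st : List (List Bool) × Int) (d : Int × Int) : List (List Bool) × Int :=
  let nr := r + d.1
  let nc := c + d.2
  if 0 ≤ nr ∧ nr < 5 ∧ 0 ≤ nc ∧ nc < 5 ∧ ¬ vGet st.1 nr nc ∧ gridIs1 grid nr nc then
    let res := go (vSet st.1 nr nc) nr nc
    (res.1, st.2 + res.2)
  else st

-- dfs(grid, visited, r, c): returns (updated visited, component size); fuel-guarded
-- (the guard only makes the same computation total: the recursion marks a fresh cell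
-- of the 5x5 board at every call, so depth never exceeds 26 on an admitted input)
def dfsGo (grid : List (List Int)) :
    Nat → List (List Bool) → Int → Int → List (List Bool) × Int
  | 0, v, _, _ => (v, 1)
  | fuel + 1, v, r, c => offs.foldl (dfsVisit grid (dfsGo grid fuel) r c) (v, 1)

def bfs_alt (grid : List (List Int)) (r : Int) (c : Int) : Bool :=
  let v0 := vSet (List.replicate 5 (List.replicate 5 false)) r c
  decide (7 ≤ (dfsGo grid 1000 v0 r c).2)

-- ===== PRECONDITION & SPEC =====
-- the 4-neighbour adjacency between board cells
abbrev Adjc (p q : Int × Int) : Prop :=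
  q = (p.1 - 1, p.2) ∨ q = (p.1 + 1, p.2) ∨ q = (p.1, p.2 + 1) ∨ q = (p.1, p.2 - 1)

def cellsF : Finset (Int × Int) :=
  ((Finset.range 5) ×ˢ (Finset.range 5)).image (fun ij => ((ij.1 : Int), (ij.2 : Int)))

-- the cell exists (grid[i][j] would not raise IndexError)
def hasCell (grid : List (List Int)) (p : Int × Int) : Bool :=
  ((PySem.List.pyGet? grid p.1).bind (fun rw => PySem.List.pyGet? rw p.2)).isSome

-- the cell A pre-marks as visited (visited[r][c] with Python's negative wrap)
def startMark (r c : Int) : Int × Int := (wrapIdx r, wrapIdx c)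

-- one closure round over the existing 1-cells, never absorbing the pre-marked cell
def reachStep (grid : List (List Int)) (M : Int × Int) (S : Finset (Int × Int)) :
    Finset (Int × Int) :=
  S ∪ cellsF.filter (fun p => p ≠ M ∧ gridIs1 grid p.1 p.2 = true ∧ ∃ t ∈ S, Adjc t p)

-- the set of cells A's flood pours out of (the start and every cell it marks)
def reachSet (grid : List (List Int)) (r c : Int) : Finset (Int × Int) :=
  (reachStep grid (startMark r c))^[25] {(r, c)}

-- Pre_ is exactly where A returns: the start index pair is Python-valid for the 5x5
-- visited board (-5 ≤ r, c < 5), and every in-range cell the flood inspects (a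
-- neighbour of a cell it pours out of, other than the pre-marked visited[r][c])
-- exists, so no grid access raises IndexError.
def Pre_bfs (grid : List (List Int)) (r : Int) (c : Int) : Prop :=
  -5 ≤ r ∧ r < 5 ∧ -5 ≤ c ∧ c < 5 ∧
  ∀ p ∈ reachSet grid r c, ∀ t ∈ cellsF, t ≠ startMark r c → Adjc p t →
    hasCell grid t = true
instance (grid : List (List Int)) (r : Int) (c : Int) : Decidable (Pre_bfs grid r c) := by
  unfold Pre_bfs; infer_instance

def pvWitness_bfs : List (List Int) × Int × Int :=
  ([[1, 1, 1, 1, 1], [1, 1, 1, 0, 0], [0, 0, 1, 0, 0], [0, 0, 1, 1, 0], [0, 0, 0, 1, 1]], 0, 0)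

def Spec_bfs (grid : List (List Int)) (r : Int) (c : Int) (out : Bool) : Prop := out = bfs_alt grid r c
instance (grid : List (List Int)) (r : Int) (c : Int) (out : Bool) : Decidable (Spec_bfs grid r c out) := by unfold Spec_bfs; infer_instance

-- ===== CLAIM (what is proved, stated in full; the proofs are below) =====
def Claim_equal_bfs : Prop := ∀ (grid : List (List Int)) (r : Int) (c : Int), Dom_bfs grid r c → Pre_bfs grid r c → Spec_bfs grid r c (bfs grid r c)

-- ===== LEMMAS AND PROOFS =====

-- the in-range predicate for a cell of the 5x5 board
abbrev inR (p : Int × Int) : Prop := 0 ≤ p.1 ∧ p.1 < 5 ∧ 0 ≤ p.2 ∧ p.2 < 5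

def WFv (v : List (List Bool)) : Prop := v.length = 5 ∧ ∀ rw ∈ v, rw.length = 5

def AV (v : List (List Bool)) : Finset (Int × Int) :=
  cellsF.filter (fun p => vGet v p.1 p.2)

theorem mem_cellsF (p : Int × Int) : p ∈ cellsF ↔ inR p := by
  unfold cellsF inR
  constructor
  · simp only [Finset.mem_image, Finset.mem_product, Finset.mem_range]
    rintro ⟨⟨a, b⟩, ⟨ha, hb⟩, rfl⟩
    refine ⟨Int.natCast_nonneg _, ?_, Int.natCast_nonneg _, ?_⟩
    · show ((a : Int)) < 5; exact_mod_cast ha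
    · show ((b : Int)) < 5; exact_mod_cast hb
  · rintro ⟨h1, h2, h3, h4⟩
    simp only [Finset.mem_image, Finset.mem_product, Finset.mem_range]
    exact ⟨(p.1.toNat, p.2.toNat), ⟨by omega, by omega⟩,
      by simp [Int.toNat_of_nonneg h1, Int.toNat_of_nonneg h3]⟩

theorem card_cellsF : cellsF.card = 25 := by decide

theorem mem_AV (v : List (List Bool)) (p : Int × Int) :
    p ∈ AV v ↔ inR p ∧ vGet v p.1 p.2 = true := by
  simp [AV, Finset.mem_filter, mem_cellsF]

theorem card_AV_le (v : List (List Bool)) : (AV v).card ≤ 25 := by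
  calc (AV v).card ≤ cellsF.card := Finset.card_le_card (Finset.filter_subset _ _)
    _ = 25 := card_cellsF

theorem getD_set_self {α : Type} (l : List α) (n : Nat) (x d : α) (h : n < l.length) :
    (l.set n x).getD n d = x := by
  simp [List.getD_eq_getElem?_getD, h]

theorem getD_set_ne {α : Type} (l : List α) (m n : Nat) (x d : α) (h : m ≠ n) :
    (l.set m x).getD n d = l.getD n d := by
  simp [List.getD_eq_getElem?_getD, List.getElem?_set_ne h]

theorem getD_replicate_ite {α : Type} (n m : Nat) (x d : α) :
    (List.replicate n x).getD m d = if m < n then x else d := by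
  rw [List.getD_eq_getElem?_getD, List.getElem?_replicate]
  split <;> simp

theorem wrapIdx_of_nonneg (i : Int) (h : 0 ≤ i) : wrapIdx i = i := if_neg (by omega)

theorem vSet_wrap (v : List (List Bool)) (i j : Int) (hi : -5 ≤ i) (hj : -5 ≤ j) :
    vSet v i j = vSet v (wrapIdx i) (wrapIdx j) := by
  unfold vSet
  rw [wrapIdx_of_nonneg (wrapIdx i) (by unfold wrapIdx; split <;> omega),
    wrapIdx_of_nonneg (wrapIdx j) (by unfold wrapIdx; split <;> omega)]

theorem WFv_vSet (v : List (List Bool)) (hWF : WFv v) (i j : Int) (hij : inR (i, j)) :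
    WFv (vSet v i j) := by
  obtain ⟨hlen, hrow⟩ := hWF
  obtain ⟨h1, h2, h3, h4⟩ := hij
  simp only at h1 h2 h3 h4
  unfold vSet
  rw [wrapIdx_of_nonneg i h1, wrapIdx_of_nonneg j h3]
  have hi : i.toNat < v.length := by omega
  refine ⟨by simp [hlen], ?_⟩
  intro rw hrw
  rcases List.mem_or_eq_of_mem_set hrw with h | h
  · exact hrow rw h
  · subst h
    rw [List.length_set, List.getD_eq_getElem _ _ hi]
    exact hrow _ (List.getElem_mem hi)

theorem vGet_vSet (v : List (List Bool)) (hWF : WFv v) (i j a b : Int)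
    (hij : inR (i, j)) (hab : inR (a, b)) :
    vGet (vSet v i j) a b = ((decide (a = i ∧ b = j)) || vGet v a b) := by
  obtain ⟨hlen, hrow⟩ := hWF
  obtain ⟨hi1, hi2, hi3, hi4⟩ := hij
  obtain ⟨ha1, ha2, ha3, ha4⟩ := hab
  simp only at hi1 hi2 hi3 hi4 ha1 ha2 ha3 ha4
  have hi : i.toNat < v.length := by omega
  have hrlen : (v.getD i.toNat []).length = 5 := by
    rw [List.getD_eq_getElem _ _ hi]; exact hrow _ (List.getElem_mem hi)
  unfold vGet vSet
  rw [wrapIdx_of_nonneg i hi1, wrapIdx_of_nonneg j hi3,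
    wrapIdx_of_nonneg a ha1, wrapIdx_of_nonneg b ha3]
  by_cases hr : a = i
  · subst hr
    rw [getD_set_self v a.toNat _ [] hi]
    by_cases hc : b = j
    · subst hc
      rw [getD_set_self (v.getD a.toNat []) b.toNat true false (by omega)]
      simp
    · rw [getD_set_ne (v.getD a.toNat []) j.toNat b.toNat true false (by omega)]
      simp [hc]
  · rw [getD_set_ne v i.toNat a.toNat _ [] (by omega)]
    simp [hr]

theorem AV_vSet (v : List (List Bool)) (hWF : WFv v) (i j : Int) (hij : inR (i, j)) :
    AV (vSet v i j) = insert (i, j) (AV v) := by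
  ext p
  by_cases hp : inR p
  · obtain ⟨a, b⟩ := p
    rw [mem_AV, Finset.mem_insert, mem_AV,
      vGet_vSet v hWF i j a b hij hp]
    simp only [Bool.or_eq_true, decide_eq_true_eq, Prod.mk.injEq]
    constructor
    · rintro ⟨h, ⟨rfl, rfl⟩ | h2⟩
      · exact Or.inl ⟨rfl, rfl⟩
      · exact Or.inr ⟨h, h2⟩
    · rintro (⟨rfl, rfl⟩ | ⟨h, h2⟩)
      · exact ⟨hij, Or.inl ⟨rfl, rfl⟩⟩
      · exact ⟨h, Or.inr h2⟩
  · simp only [mem_AV, Finset.mem_insert]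
    constructor
    · rintro ⟨h, -⟩; exact absurd h hp
    · rintro (rfl | ⟨h, -⟩)
      · exact absurd hij hp
      · exact absurd h hp

theorem WFv_blank : WFv (List.replicate 5 (List.replicate 5 false)) := by
  constructor
  · simp
  · intro rw hrw
    rw [List.eq_of_mem_replicate hrw]; simp

theorem vGet_blank (a b : Int) :
    vGet (List.replicate 5 (List.replicate 5 false)) a b = false := by
  unfold vGet
  rw [getD_replicate_ite]
  split
  · rw [getD_replicate_ite]; split <;> rfl
  · simp

theorem AV_blank_set (r c : Int) (hrc : inR (r, c)) :
    AV (vSet (List.replicate 5 (List.replicate 5 false)) r c) = {(r, c)} := by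
  rw [AV_vSet _ WFv_blank _ _ hrc]
  have h0 : AV (List.replicate 5 (List.replicate 5 false)) = ∅ := by
    ext p
    rw [mem_AV]
    simp only [vGet_blank]
    simp
  rw [h0]; rfl

-- invariant of the inner `for k in range(4)` fold, relative to the state (v0, e0) at loop entry
def InnerInv (grid : List (List Int)) (r c : Int) (v0 : List (List Bool)) (e0 : Int)
    (st : List (List Bool) × List (Int × Int) × Int) : Prop :=
  WFv st.1 ∧
  st.2.2 = e0 + st.2.1.length ∧
  AV st.1 = AV v0 ∪ st.2.1.toFinset ∧
  (AV st.1).card = (AV v0).card + st.2.1.length ∧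
  (∀ p ∈ st.2.1, inR p ∧ gridIs1 grid p.1 p.2 = true ∧ Adjc (r, c) p) ∧
  (∀ p ∈ st.2.1, p ∉ AV v0)

theorem adj_of_k (r c k : Int) (hk : k = 0 ∨ k = 1 ∨ k = 2 ∨ k = 3) :
    Adjc (r, c) (r + PySem.List.pyGetD rowOff k 0, c + PySem.List.pyGetD colOff k 0) := by
  rcases hk with rfl | rfl | rfl | rfl
  · rw [show PySem.List.pyGetD rowOff 0 0 = -1 from by decide,
      show PySem.List.pyGetD colOff 0 0 = 0 from by decide]
    exact Or.inl (by simp [Prod.ext_iff]; omega)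
  · rw [show PySem.List.pyGetD rowOff 1 0 = 1 from by decide,
      show PySem.List.pyGetD colOff 1 0 = 0 from by decide]
    exact Or.inr (Or.inl (by simp))
  · rw [show PySem.List.pyGetD rowOff 2 0 = 0 from by decide,
      show PySem.List.pyGetD colOff 2 0 = 1 from by decide]
    exact Or.inr (Or.inr (Or.inl (by simp)))
  · rw [show PySem.List.pyGetD rowOff 3 0 = 0 from by decide,
      show PySem.List.pyGetD colOff 3 0 = -1 from by decide]
    exact Or.inr (Or.inr (Or.inr (by simp [Prod.ext_iff]; omega)))

theorem neighStep_inv (grid : List (List Int)) (r c : Int) (v0 : List (List Bool)) (e0 : Int)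
    (st : List (List Bool) × List (Int × Int) × Int) (k : Int)
    (hk : k = 0 ∨ k = 1 ∨ k = 2 ∨ k = 3) (h : InnerInv grid r c v0 e0 st) :
    InnerInv grid r c v0 e0 (neighStep grid r c st k) ∧
    AV st.1 ⊆ AV (neighStep grid r c st k).1 ∧
    (inR (r + PySem.List.pyGetD rowOff k 0, c + PySem.List.pyGetD colOff k 0) →
      gridIs1 grid (r + PySem.List.pyGetD rowOff k 0) (c + PySem.List.pyGetD colOff k 0) = true →
      (r + PySem.List.pyGetD rowOff k 0, c + PySem.List.pyGetD colOff k 0) ∈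
        AV (neighStep grid r c st k).1) := by
  obtain ⟨hWF, he, hAV, hcard, hmem, hfresh⟩ := h
  unfold neighStep
  set nr := r + PySem.List.pyGetD rowOff k 0 with hnr
  set nc := c + PySem.List.pyGetD colOff k 0 with hnc
  by_cases hg : 0 ≤ nr ∧ nr < 5 ∧ 0 ≤ nc ∧ nc < 5
  · have hgR : inR (nr, nc) := hg
    by_cases hv : ¬ vGet st.1 nr nc ∧ gridIs1 grid nr nc
    · simp only [if_neg (not_not_intro hg), if_pos hv]
      have hnotmem : (nr, nc) ∉ AV st.1 := by
        rw [mem_AV]; rintro ⟨-, hvv⟩; exact hv.1 hvv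
      refine ⟨⟨WFv_vSet _ hWF _ _ hgR, ?_, ?_, ?_, ?_, ?_⟩, ?_, ?_⟩
      · simp [he]; ring
      · rw [AV_vSet _ hWF _ _ hgR, hAV]
        ext p
        simp only [Finset.mem_insert, Finset.mem_union, List.mem_toFinset,
          List.toFinset_append, List.toFinset_cons, List.toFinset_nil,
          insert_empty_eq, Finset.mem_singleton]
        tauto
      · rw [AV_vSet _ hWF _ _ hgR, Finset.card_insert_of_notMem hnotmem, hcard]
        simp
        omega
      · intro p hp
        rcases List.mem_append.mp hp with hp | hp
        · exact hmem p hp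
        · rw [List.mem_singleton.mp hp]
          exact ⟨hgR, hv.2, adj_of_k r c k hk⟩
      · intro p hp
        rcases List.mem_append.mp hp with hp | hp
        · exact hfresh p hp
        · rw [List.mem_singleton.mp hp]
          intro hmem0
          exact hnotmem (by rw [hAV]; exact Finset.mem_union_left _ hmem0)
      · intro p hp
        rw [AV_vSet _ hWF _ _ hgR]
        exact Finset.mem_insert_of_mem hp
      · intro _ _
        rw [AV_vSet _ hWF _ _ hgR]
        exact Finset.mem_insert_self _ _
    · simp only [if_neg (not_not_intro hg), if_neg hv]
      refine ⟨⟨hWF, he, hAV, hcard, hmem, hfresh⟩, fun p hp => hp, ?_⟩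
      intro hin h1
      rcases not_and_or.mp hv with hv' | hv'
      · rw [mem_AV]
        exact ⟨hin, not_not.mp hv'⟩
      · exact absurd h1 hv'
  · simp only [if_pos hg]
    exact ⟨⟨hWF, he, hAV, hcard, hmem, hfresh⟩, fun p hp => hp, fun hin _ => absurd hin hg⟩

theorem fold_inner (grid : List (List Int)) (r c : Int) (v : List (List Bool)) (e : Int)
    (hWF : WFv v) :
    InnerInv grid r c v e
      ((PySem.List.pyRange 0 4 1).foldl (neighStep grid r c) (v, ([] : List (Int × Int)), e)) ∧
    AV v ⊆ AV ((PySem.List.pyRange 0 4 1).foldl (neighStep grid r c) (v, [], e)).1 ∧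
    (∀ t, Adjc (r, c) t → inR t → gridIs1 grid t.1 t.2 = true →
      t ∈ AV ((PySem.List.pyRange 0 4 1).foldl (neighStep grid r c) (v, [], e)).1) := by
  rw [show PySem.List.pyRange 0 4 1 = [0, 1, 2, 3] from by decide]
  simp only [List.foldl_cons, List.foldl_nil]
  have h0 : InnerInv grid r c v e (v, [], e) :=
    ⟨hWF, by simp, by simp, by simp, by simp, by simp⟩
  obtain ⟨h1, m1, c1⟩ := neighStep_inv grid r c v e (v, [], e) 0 (Or.inl rfl) h0
  obtain ⟨h2, m2, c2⟩ := neighStep_inv grid r c v e _ 1 (Or.inr (Or.inl rfl)) h1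
  obtain ⟨h3, m3, c3⟩ := neighStep_inv grid r c v e _ 2 (Or.inr (Or.inr (Or.inl rfl))) h2
  obtain ⟨h4, m4, c4⟩ := neighStep_inv grid r c v e _ 3 (Or.inr (Or.inr (Or.inr rfl))) h3
  refine ⟨h4, fun p hp => m4 (m3 (m2 (m1 hp))), ?_⟩
  intro t hadj hin h1c
  rcases hadj with ht | ht | ht | ht
  · have ht' : t = (r + PySem.List.pyGetD rowOff 0 0, c + PySem.List.pyGetD colOff 0 0) := by
      rw [ht, show PySem.List.pyGetD rowOff 0 0 = -1 from by decide,
        show PySem.List.pyGetD colOff 0 0 = 0 from by decide]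
      simp [Prod.ext_iff]; omega
    subst ht'
    exact m4 (m3 (m2 (c1 hin h1c)))
  · have ht' : t = (r + PySem.List.pyGetD rowOff 1 0, c + PySem.List.pyGetD colOff 1 0) := by
      rw [ht, show PySem.List.pyGetD rowOff 1 0 = 1 from by decide,
        show PySem.List.pyGetD colOff 1 0 = 0 from by decide]
      simp
    subst ht'
    exact m4 (m3 (c2 hin h1c))
  · have ht' : t = (r + PySem.List.pyGetD rowOff 2 0, c + PySem.List.pyGetD colOff 2 0) := by
      rw [ht, show PySem.List.pyGetD rowOff 2 0 = 0 from by decide,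
        show PySem.List.pyGetD colOff 2 0 = 1 from by decide]
      simp
    subst ht'
    exact m4 (c3 hin h1c)
  · have ht' : t = (r + PySem.List.pyGetD rowOff 3 0, c + PySem.List.pyGetD colOff 3 0) := by
      rw [ht, show PySem.List.pyGetD rowOff 3 0 = 0 from by decide,
        show PySem.List.pyGetD colOff 3 0 = -1 from by decide]
      simp [Prod.ext_iff]; omega
    subst ht'
    exact c4 hin h1c

theorem mem_reachStep (grid : List (List Int)) (M : Int × Int) (S : Finset (Int × Int))
    (p : Int × Int) :
    p ∈ reachStep grid M S ↔
      p ∈ S ∨ (inR p ∧ p ≠ M ∧ gridIs1 grid p.1 p.2 = true ∧ ∃ t ∈ S, Adjc t p) := by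
  unfold reachStep
  rw [Finset.mem_union, Finset.mem_filter]
  rw [mem_cellsF]

theorem subset_reachStep (grid : List (List Int)) (M : Int × Int) (S : Finset (Int × Int)) :
    S ⊆ reachStep grid M S := fun _ hp => Finset.mem_union_left _ hp

theorem iterate_subset_self (grid : List (List Int)) (M : Int × Int)
    (S : Finset (Int × Int)) (k : Nat) : S ⊆ (reachStep grid M)^[k] S := by
  induction k with
  | zero => simp
  | succ k ih =>
    rw [Function.iterate_succ_apply']
    exact fun p hp => subset_reachStep grid M _ (ih hp)

theorem iterate_bound (grid : List (List Int)) (M : Int × Int) (s : Int × Int) (k : Nat) :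
    (reachStep grid M)^[k] {s} ⊆ insert s (cellsF.erase M) := by
  induction k with
  | zero =>
    intro p hp
    rw [Function.iterate_zero_apply, Finset.mem_singleton] at hp
    subst hp
    exact Finset.mem_insert_self _ _
  | succ k ih =>
    rw [Function.iterate_succ_apply']
    intro p hp
    rcases (mem_reachStep grid M _ p).mp hp with hp | ⟨hin, hne, -, -⟩
    · exact ih hp
    · exact Finset.mem_insert_of_mem (Finset.mem_erase.mpr ⟨hne, (mem_cellsF p).mpr hin⟩)

theorem notmem_iterate (grid : List (List Int)) (M : Int × Int) (s : Int × Int)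
    (hs : s ≠ M) (k : Nat) : M ∉ (reachStep grid M)^[k] {s} := by
  induction k with
  | zero =>
    rw [Function.iterate_zero_apply, Finset.mem_singleton]
    exact fun h => hs h.symm
  | succ k ih =>
    rw [Function.iterate_succ_apply']
    intro hM
    rcases (mem_reachStep grid M _ M).mp hM with h | ⟨-, hne, -⟩
    · exact ih h
    · exact hne rfl

theorem card_iterate_le (grid : List (List Int)) (M : Int × Int) (hM : M ∈ cellsF)
    (s : Int × Int) (k : Nat) : ((reachStep grid M)^[k] {s}).card ≤ 25 := by
  have h1 := Finset.card_le_card (iterate_bound grid M s k)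
  have h2 : (insert s (cellsF.erase M)).card ≤ (cellsF.erase M).card + 1 :=
    Finset.card_insert_le _ _
  have h3 : (cellsF.erase M).card = 24 := by
    rw [Finset.card_erase_of_mem hM, card_cellsF]
  omega

theorem reach_stab (grid : List (List Int)) (M : Int × Int) (S₀ : Finset (Int × Int))
    (hbound : ∀ k, ((reachStep grid M)^[k] S₀).card ≤ 25) :
    reachStep grid M ((reachStep grid M)^[25] S₀) = (reachStep grid M)^[25] S₀ := by
  have key : ∀ k : Nat, (reachStep grid M)^[k + 1] S₀ = (reachStep grid M)^[k] S₀ ∨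
      k + 1 ≤ ((reachStep grid M)^[k + 1] S₀).card := by
    intro k
    induction k with
    | zero =>
      rcases eq_or_ne ((reachStep grid M)^[0 + 1] S₀) ((reachStep grid M)^[0] S₀) with h | h
      · exact Or.inl h
      · right
        have hsub : (reachStep grid M)^[0] S₀ ⊆ (reachStep grid M)^[0 + 1] S₀ := by
          rw [Function.iterate_succ_apply' (n := 0)]
          exact subset_reachStep grid M _
        have hlt := Finset.card_lt_card (ssubset_of_subset_of_ne hsub h.symm)
        omega
    | succ k ih =>
      rcases eq_or_ne ((reachStep grid M)^[k + 1 + 1] S₀)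
          ((reachStep grid M)^[k + 1] S₀) with h | h
      · exact Or.inl h
      · right
        rcases ih with heq | hcard
        · exfalso
          apply h
          calc (reachStep grid M)^[k + 1 + 1] S₀
              = reachStep grid M ((reachStep grid M)^[k + 1] S₀) :=
                Function.iterate_succ_apply' (reachStep grid M) (k + 1) S₀
            _ = reachStep grid M ((reachStep grid M)^[k] S₀) := by rw [heq]
            _ = (reachStep grid M)^[k + 1] S₀ :=
                (Function.iterate_succ_apply' (reachStep grid M) k S₀).symm
        · have hsub : (reachStep grid M)^[k + 1] S₀ ⊆ (reachStep grid M)^[k + 1 + 1] S₀ := by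
            rw [Function.iterate_succ_apply' (n := k + 1)]
            exact subset_reachStep grid M _
          have hlt := Finset.card_lt_card (ssubset_of_subset_of_ne hsub h.symm)
          omega
  rcases key 25 with heq | hcard
  · calc reachStep grid M ((reachStep grid M)^[25] S₀)
        = (reachStep grid M)^[25 + 1] S₀ :=
          (Function.iterate_succ_apply' (reachStep grid M) 25 S₀).symm
      _ = (reachStep grid M)^[25] S₀ := heq
  · have := hbound (25 + 1)
    omega

-- closure of a set under the flood's expansion, except out of the pre-marked cell
def ClosedW (grid : List (List Int)) (M : Int × Int) (S : Finset (Int × Int)) : Prop :=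
  ∀ p ∈ S, p ≠ M → ∀ t : Int × Int, Adjc p t → inR t →
    gridIs1 grid t.1 t.2 = true → t ≠ M → t ∈ S

theorem bfsLoop_main (grid : List (List Int)) (M : Int × Int) (hMin : inR M) :
    ∀ (fuel : Nat) (q : List (Int × Int)) (v : List (List Bool)) (e : Int),
    WFv v → vGet v M.1 M.2 = true →
    (∀ p, p ∈ AV v → p ∉ q → p ≠ M → ∀ t, Adjc p t → inR t →
      gridIs1 grid t.1 t.2 = true → t ∈ AV v) →
    q.length + (25 - (AV v).card) ≤ fuel →
    ∃ w : Finset (Int × Int),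
      bfsLoop grid fuel q v e = e + ((w.card : Int) - ((AV v).card : Int)) ∧
      AV v ⊆ w ∧
      (∀ p, p ∈ w → p ≠ M → ∀ t, Adjc p t → inR t →
        gridIs1 grid t.1 t.2 = true → t ∈ w) ∧
      (∀ p ∈ q, ∀ t, Adjc p t → inR t → gridIs1 grid t.1 t.2 = true → t ∈ w) ∧
      (∀ S, ClosedW grid M S → AV v ⊆ S →
        (∀ p ∈ q, ∀ t, Adjc p t → inR t → gridIs1 grid t.1 t.2 = true → t ≠ M → t ∈ S) →
        w ⊆ S) := by
  intro fuel
  induction fuel with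
  | zero =>
    intro q v e hWF hM hfront hfuel
    have hq0 : q = [] := List.eq_nil_of_length_eq_zero (by omega)
    subst hq0
    refine ⟨AV v, by simp [bfsLoop], fun p hp => hp, ?_, by simp, fun S _ hsub _ => hsub⟩
    intro p hp hpM t hadj hin h1
    exact hfront p hp (by simp) hpM t hadj hin h1
  | succ fuel ih =>
    intro q v e hWF hM hfront hfuel
    match q with
    | [] =>
      refine ⟨AV v, by simp [bfsLoop], fun p hp => hp, ?_, by simp, fun S _ hsub _ => hsub⟩
      intro p hp hpM t hadj hin h1
      exact hfront p hp (by simp) hpM t hadj hin h1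
    | (a, b) :: q' =>
      obtain ⟨hInv, hmono, hclose⟩ := fold_inner grid a b v e hWF
      set st := (PySem.List.pyRange 0 4 1).foldl (neighStep grid a b)
        (v, ([] : List (Int × Int)), e) with hst
      obtain ⟨hWF', he', hAV', hcard', hmem', hfresh'⟩ := hInv
      have hMAV : M ∈ AV v := (mem_AV v M).mpr ⟨hMin, hM⟩
      have hM' : vGet st.1 M.1 M.2 = true := ((mem_AV st.1 M).mp (hmono hMAV)).2
      have hstep : bfsLoop grid (fuel + 1) ((a, b) :: q') v e =
          bfsLoop grid fuel (q' ++ st.2.1) st.1 st.2.2 := rfl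
      have hfront'' : ∀ p, p ∈ AV st.1 → p ∉ q' ++ st.2.1 → p ≠ M →
          ∀ t, Adjc p t → inR t → gridIs1 grid t.1 t.2 = true → t ∈ AV st.1 := by
        intro p hpAV hpq hpM t hadj hin h1
        rw [hAV'] at hpAV
        rcases Finset.mem_union.mp hpAV with hp | hp
        · by_cases hpab : p = (a, b)
          · subst hpab
            exact hclose t hadj hin h1
          · have hpq' : p ∉ (a, b) :: q' := by
              intro hmem2
              rcases List.mem_cons.mp hmem2 with h | h
              · exact hpab h
              · exact hpq (List.mem_append.mpr (Or.inl h))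
            exact hmono (hfront p hp hpq' hpM t hadj hin h1)
        · exact absurd (List.mem_append.mpr (Or.inr (List.mem_toFinset.mp hp))) hpq
      have hfuel'' : (q' ++ st.2.1).length + (25 - (AV st.1).card) ≤ fuel := by
        have h1 : (q' ++ st.2.1).length = q'.length + st.2.1.length := by simp
        have h2 := card_AV_le st.1
        have h3 : ((a, b) :: q').length = q'.length + 1 := by simp
        omega
      obtain ⟨w, hw1, hw2, hw3, hw4, hw5⟩ :=
        ih (q' ++ st.2.1) st.1 st.2.2 hWF' hM' hfront'' hfuel''
      refine ⟨w, ?_, fun p hp => hw2 (hmono hp), hw3, ?_, ?_⟩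
      · rw [hstep, hw1, he', hcard']
        push_cast
        ring
      · rintro p hp t hadj hin h1
        rcases List.mem_cons.mp hp with rfl | hp
        · exact hw2 (hclose t hadj hin h1)
        · exact hw4 p (List.mem_append.mpr (Or.inl hp)) t hadj hin h1
      · intro S hS hsub hqS
        have hsub' : AV st.1 ⊆ S := by
          rw [hAV']
          apply Finset.union_subset hsub
          intro p hp
          rw [List.mem_toFinset] at hp
          obtain ⟨hin, h1c, hadj⟩ := hmem' p hp
          have hpM : p ≠ M := fun h => (hfresh' p hp) (h ▸ hMAV)
          exact hqS (a, b) (by simp) p hadj hin h1c hpM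
        apply hw5 S hS hsub'
        intro p hp t hadj hin h1 htM
        rcases List.mem_append.mp hp with hp | hp
        · exact hqS p (by simp [hp]) t hadj hin h1 htM
        · have hpS : p ∈ S := by
            apply hsub'
            rw [hAV']
            exact Finset.mem_union_right _ (List.mem_toFinset.mpr hp)
          have hpM : p ≠ M := fun h => (hfresh' p hp) (h ▸ hMAV)
          exact hS p hpS hpM t hadj hin h1 htM

-- what dfs(grid, visited, r, c) guarantees about its result (the B-side invariant)
def DfsPost (grid : List (List Int)) (M : Int × Int) (v : List (List Bool)) (r c : Int)
    (out : List (List Bool) × Int) : Prop :=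
  WFv out.1 ∧
  AV v ⊆ AV out.1 ∧
  out.2 = 1 + (((AV out.1).card : Int) - ((AV v).card : Int)) ∧
  (∀ S, ClosedW grid M S → AV v ⊆ S →
    (∀ t, Adjc (r, c) t → inR t → gridIs1 grid t.1 t.2 = true → t ≠ M → t ∈ S) →
    AV out.1 ⊆ S) ∧
  (∀ p, p ∈ AV out.1 → p ∉ AV v → ∀ t, Adjc p t → inR t →
    gridIs1 grid t.1 t.2 = true → t ∈ AV out.1) ∧
  (∀ t, Adjc (r, c) t → inR t → gridIs1 grid t.1 t.2 = true → t ∈ AV out.1)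

-- invariant of the partial neighbour fold (the last clause of DfsPost not yet there)
def DfsMid (grid : List (List Int)) (M : Int × Int) (v : List (List Bool)) (r c : Int)
    (st : List (List Bool) × Int) : Prop :=
  WFv st.1 ∧
  AV v ⊆ AV st.1 ∧
  st.2 = 1 + (((AV st.1).card : Int) - ((AV v).card : Int)) ∧
  (∀ S, ClosedW grid M S → AV v ⊆ S →
    (∀ t, Adjc (r, c) t → inR t → gridIs1 grid t.1 t.2 = true → t ≠ M → t ∈ S) →
    AV st.1 ⊆ S) ∧
  (∀ p, p ∈ AV st.1 → p ∉ AV v → ∀ t, Adjc p t → inR t →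
    gridIs1 grid t.1 t.2 = true → t ∈ AV st.1)

theorem dfs_step (grid : List (List Int)) (M : Int × Int) (hMin : inR M)
    (go : List (List Bool) → Int → Int → List (List Bool) × Int)
    (v : List (List Bool)) (r c : Int) (hM : vGet v M.1 M.2 = true)
    (ih : ∀ (v' : List (List Bool)) (r' c' : Int), WFv v' → inR (r', c') →
      vGet v' r' c' = true → vGet v' M.1 M.2 = true → (AV v).card < (AV v').card →
      DfsPost grid M v' r' c' (go v' r' c'))
    (st : List (List Bool) × Int) (d : Int × Int)
    (hadj : Adjc (r, c) (r + d.1, c + d.2))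
    (hmid : DfsMid grid M v r c st) :
    DfsMid grid M v r c (dfsVisit grid go r c st d) ∧
    (∀ p, p ∈ AV st.1 → p ∈ AV (dfsVisit grid go r c st d).1) ∧
    (inR (r + d.1, c + d.2) → gridIs1 grid (r + d.1) (c + d.2) = true →
      (r + d.1, c + d.2) ∈ AV (dfsVisit grid go r c st d).1) := by
  obtain ⟨hWF, hsub, hcnt, hmin, hcl⟩ := hmid
  have hMAV : M ∈ AV v := (mem_AV v M).mpr ⟨hMin, hM⟩
  have hMst : vGet st.1 M.1 M.2 = true := ((mem_AV st.1 M).mp (hsub hMAV)).2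
  unfold dfsVisit
  set nr := r + d.1 with hnr
  set nc := c + d.2 with hnc
  by_cases hg : 0 ≤ nr ∧ nr < 5 ∧ 0 ≤ nc ∧ nc < 5 ∧ ¬ vGet st.1 nr nc ∧ gridIs1 grid nr nc
  · rw [if_pos hg]
    obtain ⟨hg1, hg2, hg3, hg4, hg5, hg6⟩ := hg
    have hgR : inR (nr, nc) := ⟨hg1, hg2, hg3, hg4⟩
    have hnotmem : (nr, nc) ∉ AV st.1 := by
      rw [mem_AV]; rintro ⟨-, hvv⟩; exact hg5 hvv
    have hnrM : (nr, nc) ≠ M := by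
      intro h
      exact hg5 (by rw [show nr = M.1 from congrArg Prod.fst h,
        show nc = M.2 from congrArg Prod.snd h]; exact hMst)
    have hAVins : AV (vSet st.1 nr nc) = insert (nr, nc) (AV st.1) :=
      AV_vSet _ hWF _ _ hgR
    have hcard : (AV (vSet st.1 nr nc)).card = (AV st.1).card + 1 := by
      rw [hAVins, Finset.card_insert_of_notMem hnotmem]
    have hpost := ih (vSet st.1 nr nc) nr nc (WFv_vSet _ hWF _ _ hgR) hgR
      (by rw [vGet_vSet _ hWF nr nc nr nc hgR hgR]; simp)
      (by
        rw [vGet_vSet _ hWF nr nc M.1 M.2 hgR hMin]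
        simp [hMst])
      (by
        have hle := Finset.card_le_card hsub
        omega)
    obtain ⟨pWF, pSub, pCnt, pMin, pCl, pNb⟩ := hpost
    have hins : AV st.1 ⊆ AV (go (vSet st.1 nr nc) nr nc).1 := by
      intro p hp
      exact pSub (by rw [hAVins]; exact Finset.mem_insert_of_mem hp)
    have hnrmem : (nr, nc) ∈ AV (go (vSet st.1 nr nc) nr nc).1 :=
      pSub (by rw [hAVins]; exact Finset.mem_insert_self _ _)
    refine ⟨⟨pWF, fun p hp => hins (hsub hp), ?_, ?_, ?_⟩, fun p hp => hins hp,
      fun _ _ => hnrmem⟩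
    · show st.2 + (go (vSet st.1 nr nc) nr nc).2 = _
      rw [hcnt, pCnt, hcard]
      push_cast
      ring
    · intro S hS hvS hrootS
      have hstS : AV st.1 ⊆ S := hmin S hS hvS hrootS
      have hnrS : (nr, nc) ∈ S := hrootS (nr, nc) hadj hgR hg6 hnrM
      refine pMin S hS (by rw [hAVins]; exact Finset.insert_subset hnrS hstS) ?_
      intro t ht hin h1 htM
      exact hS (nr, nc) hnrS hnrM t ht hin h1 htM
    · intro p hp hpv t ht hin h1
      by_cases hpst : p ∈ AV st.1
      · exact hins (hcl p hpst hpv t ht hin h1)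
      · by_cases hpnr : p = (nr, nc)
        · subst hpnr
          exact pNb t ht hin h1
        · refine pCl p hp ?_ t ht hin h1
          rw [hAVins, Finset.mem_insert]
          rintro (h | h)
          · exact hpnr h
          · exact hpst h
  · rw [if_neg hg]
    refine ⟨⟨hWF, hsub, hcnt, hmin, hcl⟩, fun p hp => hp, ?_⟩
    intro hin h1
    rw [mem_AV]
    refine ⟨hin, ?_⟩
    by_contra hv
    exact hg ⟨hin.1, hin.2.1, hin.2.2.1, hin.2.2.2, fun hh => hv hh, h1⟩

theorem dfs_main (grid : List (List Int)) (M : Int × Int) (hMin : inR M) :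
    ∀ (fuel : Nat) (v : List (List Bool)) (r c : Int),
    WFv v → vGet v M.1 M.2 = true → 25 - (AV v).card ≤ fuel →
    DfsPost grid M v r c (dfsGo grid fuel v r c) := by
  intro fuel
  induction fuel with
  | zero =>
    intro v r c hWF hM hfuel
    have hle := card_AV_le v
    have hfull : AV v = cellsF :=
      Finset.eq_of_subset_of_card_le (Finset.filter_subset _ _) (by rw [card_cellsF]; omega)
    have hall : ∀ t : Int × Int, inR t → t ∈ AV v := by
      intro t ht; rw [hfull]; exact (mem_cellsF t).mpr ht
    show DfsPost grid M v r c (v, 1)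
    refine ⟨hWF, fun p hp => hp,
      by show (1 : Int) = 1 + (((AV v).card : Int) - ((AV v).card : Int)); omega,
      fun S _ hsub _ => hsub, ?_, ?_⟩
    · intro p hp hpv; exact absurd hp hpv
    · intro t _ hin _; exact hall t hin
  | succ fuel ihf =>
    intro v r c hWF hM hfuel
    have hstep : dfsGo grid (fuel + 1) v r c =
        offs.foldl (dfsVisit grid (dfsGo grid fuel) r c) (v, 1) := rfl
    have ih : ∀ (v' : List (List Bool)) (r' c' : Int), WFv v' → inR (r', c') →
        vGet v' r' c' = true → vGet v' M.1 M.2 = true → (AV v).card < (AV v').card →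
        DfsPost grid M v' r' c' (dfsGo grid fuel v' r' c') := by
      intro v' r' c' h1 h2 h3 h4 h5
      exact ihf v' r' c' h1 h4 (by omega)
    have h0 : DfsMid grid M v r c (v, 1) :=
      ⟨hWF, fun p hp => hp,
        by show (1 : Int) = 1 + (((AV v).card : Int) - ((AV v).card : Int)); omega,
        fun S _ hsub _ => hsub, fun p hp hpv => absurd hp hpv⟩
    have hadj1 : Adjc (r, c) (r + ((-1 : Int), (0 : Int)).1, c + ((-1 : Int), (0 : Int)).2) := by
      left; simp; omega
    have hadj2 : Adjc (r, c) (r + ((1 : Int), (0 : Int)).1, c + ((1 : Int), (0 : Int)).2) := by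
      right; left; simp
    have hadj3 : Adjc (r, c) (r + ((0 : Int), (1 : Int)).1, c + ((0 : Int), (1 : Int)).2) := by
      right; right; left; simp
    have hadj4 : Adjc (r, c) (r + ((0 : Int), (-1 : Int)).1, c + ((0 : Int), (-1 : Int)).2) := by
      right; right; right; simp; omega
    rw [hstep, show offs = [(-1, 0), (1, 0), (0, 1), (0, -1)] from rfl]
    simp only [List.foldl_cons, List.foldl_nil]
    obtain ⟨m1, s1, c1⟩ := dfs_step grid M hMin (dfsGo grid fuel) v r c hM ih (v, 1) (-1, 0) hadj1 h0
    obtain ⟨m2, s2, c2⟩ := dfs_step grid M hMin (dfsGo grid fuel) v r c hM ih _ (1, 0) hadj2 m1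
    obtain ⟨m3, s3, c3⟩ := dfs_step grid M hMin (dfsGo grid fuel) v r c hM ih _ (0, 1) hadj3 m2
    obtain ⟨m4, s4, c4⟩ := dfs_step grid M hMin (dfsGo grid fuel) v r c hM ih _ (0, -1) hadj4 m3
    obtain ⟨w1, w2, w3, w4, w5⟩ := m4
    refine ⟨w1, w2, w3, w4, w5, ?_⟩
    intro t hadj hin h1
    rcases hadj with ht | ht | ht | ht
    · have ht' : t = (r + ((-1 : Int), (0 : Int)).1, c + ((-1 : Int), (0 : Int)).2) := by
        rw [ht]; simp; omega
      subst ht'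
      exact s4 _ (s3 _ (s2 _ (c1 hin h1)))
    · have ht' : t = (r + ((1 : Int), (0 : Int)).1, c + ((1 : Int), (0 : Int)).2) := by
        rw [ht]; simp
      subst ht'
      exact s4 _ (s3 _ (c2 hin h1))
    · have ht' : t = (r + ((0 : Int), (1 : Int)).1, c + ((0 : Int), (1 : Int)).2) := by
        rw [ht]; simp
      subst ht'
      exact s4 _ (c3 hin h1)
    · have ht' : t = (r + ((0 : Int), (-1 : Int)).1, c + ((0 : Int), (-1 : Int)).2) := by
        rw [ht]; simp; omega
      subst ht'
      exact c4 hin h1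

theorem bfs_spec : Claim_equal_bfs := by
  unfold Claim_equal_bfs
  intro grid r c hdom hpre
  unfold Spec_bfs bfs bfs_alt
  obtain ⟨hr1, hr2, hc1, hc2, -⟩ := hpre
  set M := startMark r c with hMdef
  have hMin : inR M := by
    rw [hMdef]
    unfold startMark wrapIdx
    refine ⟨?_, ?_, ?_, ?_⟩ <;> simp only <;> split <;> omega
  have hMcases : (inR (r, c) → M = (r, c)) ∧ (¬ inR (r, c) → ∀ t : Int × Int, inR t → t ≠ (r, c)) := by
    constructor
    · rintro ⟨h1, h2, h3, h4⟩
      simp only at h1 h2 h3 h4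
      rw [hMdef]
      unfold startMark wrapIdx
      rw [if_neg (by omega), if_neg (by omega)]
    · intro hnin t ht heq
      exact hnin (heq ▸ ht)
  have hv0eq : vSet (List.replicate 5 (List.replicate 5 false)) r c =
      vSet (List.replicate 5 (List.replicate 5 false)) M.1 M.2 := by
    rw [hMdef]
    exact vSet_wrap _ r c (by omega) (by omega)
  have hAV0 : AV (vSet (List.replicate 5 (List.replicate 5 false)) r c) = {M} := by
    rw [hv0eq]
    exact AV_blank_set M.1 M.2 (by simpa using hMin)
  have hWF0 : WFv (vSet (List.replicate 5 (List.replicate 5 false)) r c) := by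
    rw [hv0eq]
    exact WFv_vSet _ WFv_blank _ _ (by simpa using hMin)
  have hcard0 : (AV (vSet (List.replicate 5 (List.replicate 5 false)) r c)).card = 1 := by
    rw [hAV0]; rfl
  have hM0 : vGet (vSet (List.replicate 5 (List.replicate 5 false)) r c) M.1 M.2 = true := by
    have := (mem_AV (vSet (List.replicate 5 (List.replicate 5 false)) r c) M).mp
      (by rw [hAV0]; exact Finset.mem_singleton_self M)
    exact this.2
  -- the common target: the pre-marked cell plus the flood's set minus the raw start
  have hMcells : M ∈ cellsF := (mem_cellsF M).mpr hMin
  have hbound : ∀ k, ((reachStep grid M)^[k] ({(r, c)} : Finset (Int × Int))).card ≤ 25 :=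
    card_iterate_le grid M hMcells (r, c)
  have hfix : reachStep grid M ((reachStep grid M)^[25] ({(r, c)} : Finset (Int × Int))) =
      (reachStep grid M)^[25] ({(r, c)} : Finset (Int × Int)) :=
    reach_stab grid M _ hbound
  set RB := (reachStep grid M)^[25] ({(r, c)} : Finset (Int × Int)) with hRB
  have hsRB : (r, c) ∈ RB :=
    iterate_subset_self grid M _ 25 (Finset.mem_singleton_self _)
  have hRBexp : ∀ p ∈ RB, ∀ t, Adjc p t → inR t → gridIs1 grid t.1 t.2 = true →
      t ≠ M → t ∈ RB := by
    intro p hp t hadj hin h1 htM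
    rw [← hfix]
    exact (mem_reachStep grid M _ t).mpr (Or.inr ⟨hin, htM, h1, p, hp, hadj⟩)
  have htne : ∀ t : Int × Int, inR t → t ≠ M → t ≠ (r, c) := by
    intro t ht htM heq
    by_cases hin : inR (r, c)
    · exact htM (heq.trans (hMcases.1 hin).symm)
    · exact hMcases.2 hin t ht heq
  set T : Finset (Int × Int) := insert M (RB.erase (r, c)) with hT
  have hTclosed : ClosedW grid M T := by
    intro p hp hpM t hadj hin h1 htM
    rw [hT, Finset.mem_insert] at hp
    rcases hp with rfl | hp
    · exact absurd rfl hpM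
    · have hpRB : p ∈ RB := Finset.mem_of_mem_erase hp
      have htRB : t ∈ RB := hRBexp p hpRB t hadj hin h1 htM
      rw [hT, Finset.mem_insert]
      exact Or.inr (Finset.mem_erase.mpr ⟨htne t hin htM, htRB⟩)
  have hMT : M ∈ T := Finset.mem_insert_self _ _
  have hrootT : ∀ t, Adjc (r, c) t → inR t → gridIs1 grid t.1 t.2 = true → t ≠ M → t ∈ T := by
    intro t hadj hin h1 htM
    have htRB : t ∈ RB := hRBexp (r, c) hsRB t hadj hin h1 htM
    rw [hT, Finset.mem_insert]
    exact Or.inr (Finset.mem_erase.mpr ⟨htne t hin htM, htRB⟩)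
  -- A side
  obtain ⟨w, hw1, hw2, hw3, hw4, hw5⟩ := bfsLoop_main grid M hMin 1000 [(r, c)]
    (vSet (List.replicate 5 (List.replicate 5 false)) r c) 0 hWF0 hM0
    (by
      intro p hp hpq hpM
      rw [hAV0, Finset.mem_singleton] at hp
      exact absurd hp hpM)
    (by rw [hcard0]; simp)
  -- B side
  obtain ⟨dWF, dSub, dCnt, dMin, dCl, dNb⟩ := dfs_main grid M hMin 1000
    (vSet (List.replicate 5 (List.replicate 5 false)) r c) r c hWF0 hM0
    (by rw [hcard0]; omega)
  -- both marked sets are T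
  have hMw : M ∈ w := hw2 (by rw [hAV0]; exact Finset.mem_singleton_self M)
  have hRBsub : ∀ (X : Finset (Int × Int)), M ∈ X →
      (∀ t, Adjc (r, c) t → inR t → gridIs1 grid t.1 t.2 = true → t ∈ X) →
      (∀ p, p ∈ X → p ≠ M → ∀ t, Adjc p t → inR t → gridIs1 grid t.1 t.2 = true → t ∈ X) →
      ∀ k, (reachStep grid M)^[k] ({(r, c)} : Finset (Int × Int)) ⊆ insert (r, c) X := by
    intro X hMX hrootX hclX k
    induction k with
    | zero =>
      intro p hp
      rw [Function.iterate_zero_apply, Finset.mem_singleton] at hp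
      subst hp
      exact Finset.mem_insert_self _ _
    | succ k ihk =>
      rw [Function.iterate_succ_apply']
      intro p hp
      rcases (mem_reachStep grid M _ p).mp hp with hp | ⟨hin, hpM, h1, t, htS, hadj⟩
      · exact ihk hp
      · by_cases hts : t = (r, c)
        · subst hts
          exact Finset.mem_insert_of_mem (hrootX p hadj hin h1)
        · have htX : t ∈ X := by
            rcases Finset.mem_insert.mp (ihk htS) with h | h
            · exact absurd h hts
            · exact h
          have htM : t ≠ M := by
            by_cases hsM : (r, c) = M
            · intro h
              exact hts (h.trans hsM.symm)
            · intro h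
              exact notmem_iterate grid M (r, c) hsM k (h ▸ htS)
          exact Finset.mem_insert_of_mem (hclX t htX htM p hadj hin h1)
  have hwT : w = T := by
    apply Finset.Subset.antisymm
    · refine hw5 T hTclosed (by rw [hAV0]; simpa using hMT) ?_
      rintro p hp t hadj hin h1 htM
      rw [List.mem_singleton] at hp
      subst hp
      exact hrootT t hadj hin h1 htM
    · rw [hT]
      apply Finset.insert_subset hMw
      intro p hp
      obtain ⟨hps, hpRB⟩ := Finset.mem_erase.mp hp
      have hin := hRBsub w hMw
        (fun t ha hi h1 => hw4 (r, c) (by simp) t ha hi h1) hw3 25 hpRB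
      rcases Finset.mem_insert.mp hin with h | h
      · exact absurd h hps
      · exact h
  have hMd : M ∈ AV (dfsGo grid 1000
      (vSet (List.replicate 5 (List.replicate 5 false)) r c) r c).1 :=
    dSub (by rw [hAV0]; exact Finset.mem_singleton_self M)
  have hdT : AV (dfsGo grid 1000
      (vSet (List.replicate 5 (List.replicate 5 false)) r c) r c).1 = T := by
    apply Finset.Subset.antisymm
    · exact dMin T hTclosed (by rw [hAV0]; simpa using hMT) hrootT
    · rw [hT]
      apply Finset.insert_subset hMd
      intro p hp
      obtain ⟨hps, hpRB⟩ := Finset.mem_erase.mp hp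
      have hin := hRBsub _ hMd dNb
        (fun q hqX hqM => dCl q hqX (by rw [hAV0, Finset.mem_singleton]; exact hqM)) 25 hpRB
      rcases Finset.mem_insert.mp hin with h | h
      · exact absurd h hps
      · exact h
  show decide (6 ≤ bfsLoop grid 1000 [(r, c)]
      (vSet (List.replicate 5 (List.replicate 5 false)) r c) 0) =
    decide (7 ≤ (dfsGo grid 1000
      (vSet (List.replicate 5 (List.replicate 5 false)) r c) r c).2)
  rw [hw1, hcard0, hwT, dCnt, hcard0, hdT]
  have hTpos : 1 ≤ T.card := Finset.card_pos.mpr ⟨M, hMT⟩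
  apply decide_eq_decide.mpr
  constructor <;> intro hh <;> omega
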